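-- pv_equiv track=rewrite | github.com/Aru9/codilityExercisesPython | CodilityExercises/ExamQuestions/AB_Arrangment.py | solution
-- ===== SOURCE A (Python) =====
-- def solution(S):
--     N = len(S)
--     prefix_B = [0] * (N + 1)
--     suffix_A = [0] * (N + 1)
--
--     for i in range(1, N + 1):
--         prefix_B[i] = prefix_B[i - 1] + (1 if S[i - 1] == 'B' else 0)
--
--     for i in range(N - 1, -1, -1):
--         suffix_A[i] = suffix_A[i + 1] + (1 if S[i] == 'A' else 0)
--
--     min_deletions = float('inf')
--     for i in range(N + 1):
--         min_deletions = min(min_deletions, prefix_B[i] + suffix_A[i])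
--
--     return min_deletions
-- ===== SOURCE B (Python) =====
-- def solution(S):
--     count_b = 0
--     result = 0
--     for ch in S:
--         if ch == 'B':
--             count_b += 1
--         elif ch == 'A':
--             result = min(result + 1, count_b)
--     return result
-- ===== Notes on version B (the rewrite author's own statement) =====
-- stated objective: simpler
-- what changed: Replaces the three passes with prefix/suffix arrays and a split-point scan by a single forward pass keeping two scalars (B-count so far and the running minimum deletions), O(1) extra space instead of O(n).
import Mathlib
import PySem

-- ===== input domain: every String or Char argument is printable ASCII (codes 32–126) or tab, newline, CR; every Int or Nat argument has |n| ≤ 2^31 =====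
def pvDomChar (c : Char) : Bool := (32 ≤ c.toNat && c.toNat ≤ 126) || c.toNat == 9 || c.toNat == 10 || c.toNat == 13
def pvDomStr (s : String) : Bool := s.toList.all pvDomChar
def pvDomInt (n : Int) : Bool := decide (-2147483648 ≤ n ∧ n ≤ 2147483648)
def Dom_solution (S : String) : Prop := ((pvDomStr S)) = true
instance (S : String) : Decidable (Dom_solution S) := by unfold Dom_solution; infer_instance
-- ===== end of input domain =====

-- B replaces A's two prefix/suffix arrays and split-point scan by one forward pass with two scalars (simpler, O(1) space).

-- ===== PORT A =====
-- 1 if S[i] == 'B' else 0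
def bval (c : Char) : Int := if c = 'B' then 1 else 0
-- 1 if S[i] == 'A' else 0
def aval (c : Char) : Int := if c = 'A' then 1 else 0

-- the backward loop filling suffix_A: suffix_A[i] = suffix_A[i+1] + aval S[i], seeded with 0
def sufA : List Char → List Int
  | [] => [0]
  | c :: t => (aval c + (sufA t).headI) :: sufA t

def solution (S : String) : Int :=
  let cs := S.toList
  -- forward loop filling prefix_B: each entry is the previous one plus bval of the char
  let prefixB : List Int := List.scanl (fun acc c => acc + bval c) 0 cs
  let suffixA : List Int := sufA cs
  -- final loop: min over prefix_B[i] + suffix_A[i] (inf seed = min of the nonempty list)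
  let sums : List Int := List.zipWith (· + ·) prefixB suffixA
  sums.tail.foldl min sums.headI

-- ===== PORT B =====
def stepB (st : Int × Int) (c : Char) : Int × Int :=
  if c = 'B' then (st.1 + 1, st.2)
  else if c = 'A' then (st.1, min (st.2 + 1) st.1)
  else st

def solution_alt (S : String) : Int :=
  (S.toList.foldl stepB (0, 0)).2

-- ===== PRECONDITION & SPEC =====
def Spec_solution (S : String) (out : Int) : Prop := out = solution_alt S
instance (S : String) (out : Int) : Decidable (Spec_solution S out) := by unfold Spec_solution; infer_instance

-- ===== CLAIM (what is proved, stated in full; the proofs are below) =====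
def Claim_equal_solution : Prop := ∀ (S : String), Dom_solution S → Spec_solution S (solution S)

-- ===== LEMMAS AND PROOFS =====

def countA : List Char → Int
  | [] => 0
  | c :: t => aval c + countA t

def countB : List Char → Int
  | [] => 0
  | c :: t => bval c + countB t

-- spec: minimum deletions for l (min over split points of #B before + #A after)
def gMin : List Char → Int
  | [] => 0
  | c :: t => min (aval c + countA t) (bval c + gMin t)

theorem sufA_headI (l : List Char) : (sufA l).headI = countA l := by
  induction l with
  | nil => simp [sufA, countA]
  | cons c t ih => simp [sufA, countA, ih]

theorem foldl_min_comm (l : List Int) (x y : Int) :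
    List.foldl min (min x y) l = min x (List.foldl min y l) := by
  induction l generalizing y with
  | nil => simp
  | cons z t ih => simpa [List.foldl, min_assoc] using ih (min y z)

theorem foldl_min_ne (m : List Int) (x : Int) (h : m ≠ []) :
    List.foldl min x m = min x (List.foldl min m.headI m.tail) := by
  cases m with
  | nil => exact absurd rfl h
  | cons y t => simpa [List.foldl] using foldl_min_comm t x y

theorem zip_ne (l : List Char) (a : Int) :
    List.zipWith (· + ·) (List.scanl (fun acc c => acc + bval c) a l) (sufA l) ≠ [] := by
  cases l <;> simp [sufA, List.scanl]

theorem portA_eq (l : List Char) (a : Int) :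
    (List.zipWith (· + ·) (List.scanl (fun acc c => acc + bval c) a l) (sufA l)).tail.foldl min
      (List.zipWith (· + ·) (List.scanl (fun acc c => acc + bval c) a l) (sufA l)).headI
      = a + gMin l := by
  induction l generalizing a with
  | nil => simp [sufA, List.scanl, gMin]
  | cons c t ih =>
    have hne := zip_ne t (a + bval c)
    rw [List.scanl_cons]
    simp only [sufA, List.zipWith, List.tail_cons, List.headI_cons]
    rw [foldl_min_ne _ _ hne, ih (a + bval c)]
    rw [sufA_headI]
    simp only [gMin]
    omega

theorem stepB_snoc (p : List Char) (c : Char) :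
    stepB (countB p, gMin p) c = (countB (p ++ [c]), gMin (p ++ [c])) := by
  have hA : ∀ q, countA (q ++ [c]) = countA q + aval c := by
    intro q; induction q with
    | nil => simp [countA]
    | cons d t ih => simp [countA, ih]; ring
  have hB : ∀ q, countB (q ++ [c]) = countB q + bval c := by
    intro q; induction q with
    | nil => simp [countB]
    | cons d t ih => simp [countB, ih]; ring
  have hG : gMin (p ++ [c]) =
      if c = 'B' then gMin p else if c = 'A' then min (gMin p + 1) (countB p) else gMin p := by
    induction p with
    | nil =>
      simp only [List.nil_append, gMin, countA, countB, aval, bval]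
      split_ifs <;> simp_all
    | cons d t ih =>
      simp only [List.cons_append, gMin, ih, hA, countB, aval, bval]
      split_ifs <;> simp_all <;> omega
  simp only [stepB, hG, hB]
  split_ifs <;> simp [bval, *]

theorem foldB_inv (l p : List Char) :
    List.foldl stepB (countB p, gMin p) l = (countB (p ++ l), gMin (p ++ l)) := by
  induction l generalizing p with
  | nil => simp
  | cons c t ih =>
    have := ih (p ++ [c])
    simpa [List.foldl, stepB_snoc] using this

-- ===== VERDICT (by name: the statement is the Claim_ definition above) =====
theorem solution_spec : Claim_equal_solution := by
  unfold Claim_equal_solution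
  intro S _
  unfold Spec_solution solution solution_alt
  have hb := foldB_inv S.toList []
  simp only [List.nil_append] at hb
  simp only [countB, gMin] at hb
  rw [hb]
  simpa using portA_eq S.toList 0
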